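-- pv_equiv track=rewrite | github.com/rod-americo/VivoSMSRelay | modem_crypto.py | hexstr2array
-- ===== SOURCE A (Python) =====
-- def hexstr2array(input_str, length):
--     """Converte uma string hexadecimal para um array de bytes (inteiros)."""
--     output = [0] * length
--     for i in range(length):
--         if i < len(input_str) // 2:
--             substr = input_str[i*2 : i*2+2]
--             try:
--                 output[i] = int(substr, 16)
--             except ValueError:
--                 output[i] = 0
--         else:
--             output[i] = 0
--     return output
-- ===== SOURCE B (Python) =====
-- def hexstr2array(input_str, length):
--     """Converte uma string hexadecimal para um array de bytes (inteiros)."""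
--     values = []
--     for i in range(0, len(input_str) - 1, 2):
--         try:
--             values.append(int(input_str[i:i+2], 16))
--         except ValueError:
--             values.append(0)
--     output = values[:max(0, length)]
--     output += [0] * (length - len(output))
--     return output
-- ===== Notes on version B (the rewrite author's own statement) =====
-- stated objective: alternative
-- what changed: A writes into a pre-allocated [0]*length inside a single range(length) loop with an i < len//2 conditional; B parses all complete hex pairs in one pass over the string, then truncates to max(0,length) and zero-pads as a separate step.
import Mathlib
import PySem

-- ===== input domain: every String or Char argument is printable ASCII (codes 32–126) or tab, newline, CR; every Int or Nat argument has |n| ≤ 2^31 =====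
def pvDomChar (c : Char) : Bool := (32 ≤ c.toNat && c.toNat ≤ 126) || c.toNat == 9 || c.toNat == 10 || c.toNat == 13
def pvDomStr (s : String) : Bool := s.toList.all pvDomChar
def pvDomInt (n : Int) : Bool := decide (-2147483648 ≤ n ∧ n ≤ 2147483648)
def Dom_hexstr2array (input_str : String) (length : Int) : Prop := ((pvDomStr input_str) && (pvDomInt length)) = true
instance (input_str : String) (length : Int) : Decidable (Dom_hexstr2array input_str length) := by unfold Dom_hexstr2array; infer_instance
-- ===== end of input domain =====

-- B replaces A's single range(length) loop with conditional writes by a parse-all-pairs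
-- pass followed by a separate truncate-and-pad step (objective: alternative decomposition).


-- ===== PORT A =====
-- output = [0]*length; for i in range(length): if i < len(s)//2 then output[i] = int(pair,16) (0 on ValueError) else output[i] = 0
def hexstr2array (input_str : String) (length : Int) : List Int :=
  let cs := input_str.toList
  let output : List Int := List.replicate length.toNat 0
  (PySem.List.pyRange 0 length 1).foldl
    (fun output i =>
      if i < PySem.Int.floordiv (cs.length : Int) 2 then
        let substr := PySem.List.slice cs (some (i * 2)) (some (i * 2 + 2))
        PySem.List.pySetD output i
          (match PySem.Int.ofCharsBase? substr 16 with
           | some v => v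
           | none => 0)
      else
        PySem.List.pySetD output i 0)
    output

-- ===== PORT B =====
-- parse every complete two-char pair into values; then output = values[:max(0,length)] padded with zeros to length
def hexstr2array_alt (input_str : String) (length : Int) : List Int :=
  let cs := input_str.toList
  let values : List Int :=
    (PySem.List.pyRange 0 ((cs.length : Int) - 1) 2).foldl
      (fun vs i =>
        vs ++ [match PySem.Int.ofCharsBase? (PySem.List.slice cs (some i) (some (i + 2))) 16 with
               | some v => v
               | none => 0])
      []
  let output := PySem.List.slice values none (some (max 0 length))
  output ++ List.replicate (length - (output.length : Int)).toNat 0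

-- ===== PRECONDITION & SPEC =====
def Spec_hexstr2array (input_str : String) (length : Int) (out : List Int) : Prop := out = hexstr2array_alt input_str length
instance (input_str : String) (length : Int) (out : List Int) : Decidable (Spec_hexstr2array input_str length out) := by unfold Spec_hexstr2array; infer_instance

-- ===== CLAIM (what is proved, stated in full; the proofs are below) =====
def Claim_equal_hexstr2array : Prop := ∀ (input_str : String) (length : Int), Dom_hexstr2array input_str length → Spec_hexstr2array input_str length (hexstr2array input_str length)

-- ===== LEMMAS AND PROOFS =====

-- the value both programs compute for pair k of the char list
def pvPair (cs : List Char) (k : Nat) : Int :=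
  match PySem.Int.ofCharsBase? ((cs.drop (2 * k)).take 2) 16 with
  | some v => v
  | none => 0

theorem pv_floordiv_two (n : Nat) : PySem.Int.floordiv (n : Int) 2 = ((n / 2 : Nat) : Int) := by
  simp [PySem.Int.floordiv, Int.fdiv_eq_ediv_of_nonneg]

-- A's setter loop over range(j, m) on a list of length m writes F i at every index
theorem pv_setter_loop (F : Int → Int) (m : Nat) :
    ∀ (d j : Nat) (out : List Int), m - j = d → j ≤ m → out.length = m →
    (PySem.List.pyRange (j : Int) (m : Int) 1).foldl
        (fun o i => PySem.List.pySetD o i (F i)) out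
      = out.take j ++ (List.range (m - j)).map (fun (k : Nat) => F ((j : Int) + (k : Int))) := by
  intro d
  induction d with
  | zero =>
    intro j out hd hj hlen
    have hjm : j = m := by omega
    subst hjm
    rw [PySem.List.pyRange_one_eq_nil (le_refl _)]
    simp [List.take_of_length_le (le_of_eq hlen)]
  | succ d ih =>
    intro j out hd hj hlen
    have hjm : j < m := by omega
    rw [PySem.List.pyRange_one_cons (by exact_mod_cast hjm)]
    simp only [List.foldl_cons, PySem.List.pySetD_natCast]
    have hc : ((j : Int) + 1) = ((j + 1 : Nat) : Int) := by push_cast; ring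
    rw [hc, ih (j+1) _ (by omega) (by omega) (by simp [hlen])]
    have hset : ((out.set j (F j)).take (j+1)) = out.take j ++ [F j] := by
      rw [List.take_add_one, List.take_set]
      simp [hlen ▸ hjm, List.set_eq_of_length_le]
    rw [hset]
    have hr : m - j = (m - (j+1)) + 1 := by omega
    rw [hr, List.range_succ_eq_map, List.map_cons, List.map_map]
    simp only [List.append_assoc, List.cons_append, Nat.cast_zero, add_zero]
    congr 1
    congr 1
    apply List.map_congr_left
    intro k _
    simp only [Function.comp]
    congr 1
    push_cast
    ring

-- the same loop started at 0
theorem pv_setter_loop0 (F : Int → Int) (m : Nat) (out : List Int) (hlen : out.length = m) :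
    (PySem.List.pyRange 0 (m : Int) 1).foldl
        (fun o i => PySem.List.pySetD o i (F i)) out
      = (List.range m).map (fun (k : Nat) => F (k : Int)) := by
  have h := pv_setter_loop F m m 0 out (by omega) (by omega) hlen
  simpa using h

-- B's pair loop produces the list of pair values
theorem pv_values (cs : List Char) :
    (PySem.List.pyRange 0 ((cs.length : Int) - 1) 2).foldl
        (fun vs i =>
          vs ++ [match PySem.Int.ofCharsBase? (PySem.List.slice cs (some i) (some (i + 2))) 16 with
                 | some v => v
                 | none => 0])
        []
      = (List.range (cs.length / 2)).map (pvPair cs) := by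
  rw [PySem.List.pyRange_of_pos 0 ((cs.length : Int) - 1) (by norm_num)]
  rw [PySem.List.foldl_append_singleton_eq_map, List.map_map, List.nil_append]
  have hN : (if (0:Int) < (cs.length : Int) - 1 then (((cs.length : Int) - 1 - 0 + 2 - 1) / 2).toNat else 0) = cs.length / 2 := by
    split <;> omega
  rw [hN]
  apply List.map_congr_left
  intro k _
  simp only [Function.comp]
  have h1 : (0:Int) + 2 * (k : Int) = ((2 * k : Nat) : Int) := by push_cast; ring
  have h2 : ((2 * k : Nat) : Int) + 2 = ((2 * k : Nat) : Int) + ((2 : Nat) : Int) := by norm_num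
  rw [h1, h2, PySem.List.slice_natCast_add]
  rfl

-- truncate-and-pad of the pair list equals A's conditional map
theorem pv_pad (cs : List Char) (m : Nat) :
    (List.range m).map (fun (k : Nat) => if (k : Int) < ((cs.length / 2 : Nat) : Int) then pvPair cs k else 0)
      = (List.range (min m (cs.length / 2))).map (pvPair cs)
        ++ List.replicate (m - min m (cs.length / 2)) 0 := by
  set p := cs.length / 2 with hp
  by_cases h : m ≤ p
  · rw [min_eq_left h, Nat.sub_eq_zero_of_le (min_eq_left h ▸ le_refl m)]
    simp only [List.replicate_zero, List.append_nil]
    apply List.map_congr_left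
    intro k hk
    rw [List.mem_range] at hk
    rw [if_pos (by exact_mod_cast lt_of_lt_of_le hk h)]
  · rw [not_le] at h
    rw [min_eq_right h.le]
    have hm : m = p + (m - p) := by omega
    rw [hm, List.range_add, List.map_append]
    congr 1
    · apply List.map_congr_left
      intro k hk
      rw [List.mem_range] at hk
      rw [if_pos (by exact_mod_cast hk)]
    · rw [List.map_map]
      rw [List.map_congr_left (l := List.range (m - p)) (f := (fun (k : Nat) => if (k : Int) < (p : Int) then pvPair cs k else 0) ∘ (fun x => p + x)) (g := fun _ => (0:Int)) (by
        intro k hk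
        simp only [Function.comp]
        rw [if_neg (by push_cast; omega)])]
      simp

-- the two ports agree on every input
theorem pv_main (input_str : String) (length : Int) :
    hexstr2array input_str length = hexstr2array_alt input_str length := by
  unfold hexstr2array hexstr2array_alt
  simp only []
  set cs := input_str.toList with hcs
  set p := cs.length / 2 with hp
  rw [pv_values cs, pv_floordiv_two]
  simp only [PySem.List.slice_to _ (le_max_left 0 length)]
  rw [← List.map_take, List.take_range]
  simp only [List.length_map, List.length_range]
  rcases le_or_gt length 0 with hle | hpos
  · rw [PySem.List.pyRange_one_eq_nil hle]
    simp only [List.foldl_nil]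
    have h0 : length.toNat = 0 := by omega
    have hmax : (max 0 length).toNat = 0 := by omega
    rw [h0, hmax]
    simp
    omega
  · have hstep : (fun (output : List Int) (i : Int) =>
        if i < ((p : Nat) : Int) then
          PySem.List.pySetD output i
            (match PySem.Int.ofCharsBase? (PySem.List.slice cs (some (i * 2)) (some (i * 2 + 2))) 16 with
             | some v => v | none => 0)
        else PySem.List.pySetD output i 0)
        = (fun (o : List Int) (i : Int) => PySem.List.pySetD o i
            (if i < ((p : Nat) : Int) then
              (match PySem.Int.ofCharsBase? (PySem.List.slice cs (some (i * 2)) (some (i * 2 + 2))) 16 with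
               | some v => v | none => 0)
             else 0)) := by
      funext o i
      split <;> rfl
    rw [hstep]
    have hm : ((length.toNat : Nat) : Int) = length := by omega
    rw [← hm, pv_setter_loop0 _ length.toNat _ (by simp; omega)]
    have hfun : ∀ k ∈ List.range length.toNat,
        (if ((k : Nat) : Int) < ((p : Nat) : Int) then
          (match PySem.Int.ofCharsBase? (PySem.List.slice cs (some ((k : Int) * 2)) (some ((k : Int) * 2 + 2))) 16 with
           | some v => v | none => 0)
         else 0)
        = (if ((k : Nat) : Int) < ((p : Nat) : Int) then pvPair cs k else 0) := by
      intro k _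
      have h1 : (k : Int) * 2 = ((2 * k : Nat) : Int) := by push_cast; ring
      have h2 : ((2 * k : Nat) : Int) + 2 = ((2 * k : Nat) : Int) + ((2 : Nat) : Int) := by norm_num
      rw [h1, h2, PySem.List.slice_natCast_add]
      rfl
    rw [List.map_congr_left hfun, pv_pad cs length.toNat]
    have h1 : (max 0 ((length.toNat : Nat) : Int)).toNat = length.toNat := by omega
    rw [h1]
    congr 1
    congr 1
    omega

-- ===== VERDICT (by name: the statement is the Claim_ definition above) =====
theorem hexstr2array_spec : Claim_equal_hexstr2array := by
  intro input_str length _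
  unfold Spec_hexstr2array
  exact pv_main input_str length
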